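-- pv_equiv track=rewrite | github.com/qinwei-hfut/transformers-arithmetic | MyDatasets.py | convert_to_10ebased
-- ===== SOURCE A (Python) =====
-- def convert_to_10ebased(number: str, split_type: str, invert_number: bool) -> str:
--     # signal = None
--     # if number[0] == '-':
--     #     signal = '-'
--     #     number = number[1:]
--
--     output = []
--     len_number = len(number)
--     point_idx = number.index('.')
--     for i, digit in enumerate(number[::-1]):
--         if i+1 == len_number-point_idx:
--             continue
--         elif i+1 < len_number-point_idx:
--             i = (i+1) - (len_number-point_idx)
--         else:
--             i = i - (len_number - point_idx)
--         if split_type is None: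
--             output.append('10e' + str(i))
--         elif split_type == 'underscore':
--             output.append('10e' + '_'.join(str(i)))
--         elif split_type == 'character':
--             output.append(' '.join('D' + str(i) + 'E'))
--         else:
--             raise Exception(f'Wrong split_type: {split_type}')
--         output.append(digit)
--         # output.append('_')
--
--     # if signal:
--     #     output.append(signal)
--
--     # The output is already inverted. If we want it to _not_ be inverted, then we invert it.
--     if not invert_number:
--         output = output[::-1]
--     # output = output[1:]
--
--     return ' '.join(output)
-- ===== SOURCE B (Python) =====
-- def _token(split_type, exp):
--     if split_type is None:
--         return '10e' + str(exp)
--     if split_type == 'underscore':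
--         return '10e' + '_'.join(str(exp))
--     if split_type == 'character':
--         return ' '.join('D' + str(exp) + 'E')
--     raise Exception(f'Wrong split_type: {split_type}')
--
--
-- def convert_to_10ebased(number: str, split_type: str, invert_number: bool) -> str:
--     point_idx = number.index('.')
--     int_part = number[:point_idx]
--     frac_part = number[point_idx + 1:]
--     output = []
--     for j, digit in enumerate(int_part):
--         output.append(digit)
--         output.append(_token(split_type, len(int_part) - 1 - j))
--     for j, digit in enumerate(frac_part):
--         output.append(digit)
--         output.append(_token(split_type, -(j + 1)))
--     if invert_number:
--         output.reverse()
--     return ' '.join(output)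
-- ===== Notes on version B (the rewrite author's own statement) =====
-- stated objective: simpler
-- what changed: B indexes the split parts directly: it takes int_part/frac_part around the '.', emits digit+token pairs left-to-right with exponents computed from the part lengths, and reverses only when invert_number is set, instead of A's scan over the reversed string with per-position index corrections and a final un-reversal.
import Mathlib
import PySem

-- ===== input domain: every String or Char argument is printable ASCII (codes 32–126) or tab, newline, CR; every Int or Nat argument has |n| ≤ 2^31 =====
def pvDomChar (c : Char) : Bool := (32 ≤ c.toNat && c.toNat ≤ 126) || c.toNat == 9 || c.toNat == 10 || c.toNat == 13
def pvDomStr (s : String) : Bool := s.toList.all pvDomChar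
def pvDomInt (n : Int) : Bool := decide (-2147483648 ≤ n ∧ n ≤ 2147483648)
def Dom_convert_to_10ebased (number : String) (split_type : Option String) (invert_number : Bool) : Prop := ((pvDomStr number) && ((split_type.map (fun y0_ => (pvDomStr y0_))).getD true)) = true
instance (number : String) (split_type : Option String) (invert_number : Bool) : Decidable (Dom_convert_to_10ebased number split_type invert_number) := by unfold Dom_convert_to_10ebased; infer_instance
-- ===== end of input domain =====

-- B rebuilds the token list in natural left-to-right order from the integer and fractional
-- parts instead of scanning the reversed string and un-reversing at the end (objective: simpler).


-- ===== PORT A =====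
def convert_to_10ebased (number : String) (split_type : Option String) (invert_number : Bool) : String :=
  let len_number : Int := PySem.Str.len number
  let point_idx : Int := PySem.Str.find number "."   -- number.index('.'); Pre_ excludes the ValueError (no '.') case
  let output : List String :=
    (PySem.List.enumerate number.toList.reverse 0).foldl (fun output id =>   -- for i, digit in enumerate(number[::-1])
      if id.1 + 1 = len_number - point_idx then output                       -- continue
      else
        let i : Int := if id.1 + 1 < len_number - point_idx
                       then (id.1 + 1) - (len_number - point_idx)
                       else id.1 - (len_number - point_idx)
        let tok : String :=
          match split_type with
          | none => "10e" ++ PySem.Int.toStr i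
          | some s =>
            if s = "underscore" then
              "10e" ++ PySem.Str.join "_" ((PySem.Int.toStr i).toList.map (fun c => String.ofList [c]))
            else if s = "character" then
              PySem.Str.join " " (("D" ++ PySem.Int.toStr i ++ "E").toList.map (fun c => String.ofList [c]))
            else ""                                                          -- raise Exception: excluded by Pre_
        output ++ [tok, String.ofList [id.2]]) []
  let output : List String := if !invert_number then output.reverse else output
  PySem.Str.join " " output

-- ===== PORT B =====
-- '10e…' / 'D…E' token for one exponent (Source B's _token); "" stands for the raise, excluded by Pre_
def pvToken (split_type : Option String) (exp : Int) : String :=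
  match split_type with
  | none => "10e" ++ PySem.Int.toStr exp
  | some s =>
    if s = "underscore" then
      "10e" ++ PySem.Str.join "_" ((PySem.Int.toStr exp).toList.map (fun c => String.ofList [c]))
    else if s = "character" then
      PySem.Str.join " " (("D" ++ PySem.Int.toStr exp ++ "E").toList.map (fun c => String.ofList [c]))
    else ""

def convert_to_10ebased_alt (number : String) (split_type : Option String) (invert_number : Bool) : String :=
  let point_idx : Int := PySem.Str.find number "."                         -- number.index('.')
  let int_part : List Char := number.toList.take point_idx.toNat           -- number[:point_idx] (point_idx ≥ 0 under Pre_)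
  let frac_part : List Char := number.toList.drop (point_idx.toNat + 1)    -- number[point_idx+1:]
  let output : List String :=
    (PySem.List.enumerate int_part 0).foldl (fun out jd =>
      out ++ [String.ofList [jd.2], pvToken split_type ((int_part.length : Int) - 1 - jd.1)]) []
  let output : List String :=
    (PySem.List.enumerate frac_part 0).foldl (fun out jd =>
      out ++ [String.ofList [jd.2], pvToken split_type (-(jd.1 + 1))]) output
  let output : List String := if invert_number then output.reverse else output
  PySem.Str.join " " output

-- ===== PRECONDITION & SPEC =====
-- Pre_ excludes exactly the inputs where A raises: no '.' in number (ValueError from .index),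
-- or a split_type other than None/'underscore'/'character' reaching the raise (which happens
-- unless number is exactly ".", the one dotted string whose loop body never runs).
def Pre_convert_to_10ebased (number : String) (split_type : Option String) (invert_number : Bool) : Prop :=
  '.' ∈ number.toList ∧
  (split_type = none ∨ split_type = some "underscore" ∨ split_type = some "character" ∨ number = ".")
instance (number : String) (split_type : Option String) (invert_number : Bool) : Decidable (Pre_convert_to_10ebased number split_type invert_number) := by unfold Pre_convert_to_10ebased; infer_instance

def pvWitness_convert_to_10ebased : String × Option String × Bool := ("31.4", some "character", false)

def Spec_convert_to_10ebased (number : String) (split_type : Option String) (invert_number : Bool) (out : String) : Prop := out = convert_to_10ebased_alt number split_type invert_number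
instance (number : String) (split_type : Option String) (invert_number : Bool) (out : String) : Decidable (Spec_convert_to_10ebased number split_type invert_number out) := by unfold Spec_convert_to_10ebased; infer_instance

-- ===== CLAIM (what is proved, stated in full; the proofs are below) =====
def Claim_equal_convert_to_10ebased : Prop := ∀ (number : String) (split_type : Option String) (invert_number : Bool), Dom_convert_to_10ebased number split_type invert_number → Pre_convert_to_10ebased number split_type invert_number → Spec_convert_to_10ebased number split_type invert_number (convert_to_10ebased number split_type invert_number)

-- ===== LEMMAS AND PROOFS =====

-- one iteration of A's loop, as the block of list elements it appends ([] for the skipped '.')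
def pvBlockA (st : Option String) (n p : Int) (id : Int × Char) : List String :=
  if id.1 + 1 = n - p then []
  else [pvToken st (if id.1 + 1 < n - p then (id.1 + 1) - (n - p) else id.1 - (n - p)),
        String.ofList [id.2]]

-- A's foldl is init ++ flatMap of pvBlockA
lemma foldlA_eq_flatMap (l : List (Int × Char)) (st : Option String) (n p : Int)
    (init : List String) :
    l.foldl (fun output id =>
      if id.1 + 1 = n - p then output
      else
        let i : Int := if id.1 + 1 < n - p then (id.1 + 1) - (n - p) else id.1 - (n - p)
        let tok : String :=
          match st with
          | none => "10e" ++ PySem.Int.toStr i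
          | some s =>
            if s = "underscore" then
              "10e" ++ PySem.Str.join "_" ((PySem.Int.toStr i).toList.map (fun c => String.ofList [c]))
            else if s = "character" then
              PySem.Str.join " " (("D" ++ PySem.Int.toStr i ++ "E").toList.map (fun c => String.ofList [c]))
            else ""
        output ++ [tok, String.ofList [id.2]]) init
      = init ++ l.flatMap (pvBlockA st n p) := by
  rw [show (fun (output : List String) (id : Int × Char) =>
      if id.1 + 1 = n - p then output
      else
        let i : Int := if id.1 + 1 < n - p then (id.1 + 1) - (n - p) else id.1 - (n - p)
        let tok : String :=
          match st with
          | none => "10e" ++ PySem.Int.toStr i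
          | some s =>
            if s = "underscore" then
              "10e" ++ PySem.Str.join "_" ((PySem.Int.toStr i).toList.map (fun c => String.ofList [c]))
            else if s = "character" then
              PySem.Str.join " " (("D" ++ PySem.Int.toStr i ++ "E").toList.map (fun c => String.ofList [c]))
            else ""
        output ++ [tok, String.ofList [id.2]])
      = fun output id => output ++ pvBlockA st n p id from
    funext fun output => funext fun id => by
      by_cases h : id.1 + 1 = n - p
      · simp [pvBlockA, h]
      · cases st <;> simp [pvBlockA, pvToken, h]]
  exact PySem.List.foldl_append_eq_flatMap _ _ _

lemma enum_shift {α : Type} (xs : List α) (s : Int) :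
    PySem.List.enumerate xs s = (PySem.List.enumerate xs 0).map (fun jd => (jd.1 + s, jd.2)) := by
  induction xs generalizing s with
  | nil => simp [PySem.List.enumerate_nil]
  | cons x xs ih =>
    simp only [PySem.List.enumerate_cons, zero_add, ih (s+1), ih 1, List.map_cons, List.map_map]
    refine List.cons_eq_cons.mpr ⟨rfl, ?_⟩
    congr 1; funext jd; simp [Function.comp]; omega

-- enumerating the reversed list, read back-to-front, is enumerating forward with exponent-mirrored indices
lemma rev_enum {α : Type} (cs : List α) :
    (PySem.List.enumerate cs.reverse 0).reverse
      = (PySem.List.enumerate cs 0).map (fun jd => ((cs.length : Int) - 1 - jd.1, jd.2)) := by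
  apply List.ext_getElem
  · simp [PySem.List.length_enumerate]
  · intro i h1 h2
    simp only [List.length_reverse, PySem.List.length_enumerate] at h1
    rw [List.getElem_reverse]
    simp only [PySem.List.length_enumerate, List.length_reverse]
    rw [List.getElem_map, PySem.List.getElem_enumerate, PySem.List.getElem_enumerate,
      List.getElem_reverse]
    refine Prod.ext ?_ ?_
    · show ((0:Int) + _ : Int) = _
      have h2' : i < cs.length := by simpa [PySem.List.length_enumerate] using h1
      push_cast; omega
    · show cs[_] = cs[_]; congr 1; omega

-- the heart: on cs = pre ++ '.' :: suf, A's mirrored blocks read forward are B's digit/token blocks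
lemma aux_split (pre : List Char) (c : Char) (suf : List Char) (st : Option String) :
    (PySem.List.enumerate (pre ++ c :: suf) 0).flatMap
        (fun jd => (pvBlockA st (((pre ++ c :: suf).length : Int)) ((pre.length : Int))
          (((pre ++ c :: suf).length : Int) - 1 - jd.1, jd.2)).reverse)
      = (PySem.List.enumerate pre 0).flatMap
          (fun jd => [String.ofList [jd.2], pvToken st ((pre.length : Int) - 1 - jd.1)])
        ++ (PySem.List.enumerate suf 0).flatMap
          (fun jd => [String.ofList [jd.2], pvToken st (-(jd.1 + 1))]) := by
  rw [PySem.List.enumerate_append, List.flatMap_append, PySem.List.enumerate_cons]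
  congr 1
  · apply List.flatMap_congr
    intro jd hjd
    rcases (PySem.List.mem_enumerate_iff _ _ _).1 hjd with ⟨k, hk, rfl⟩
    simp only [pvBlockA, List.length_append, List.length_cons]
    rw [if_neg (by push_cast; omega), if_neg (by push_cast; omega)]
    simp only [List.reverse_cons, List.reverse_nil, List.nil_append, List.singleton_append,
      List.cons.injEq, and_true, true_and]
    exact congrArg (pvToken st) (by push_cast; omega)
  · rw [List.flatMap_cons]
    have hmid : pvBlockA st (((pre ++ c :: suf).length : Int)) ((pre.length : Int))
        (((pre ++ c :: suf).length : Int) - 1 - (0 + pre.length), c) = [] := by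
      simp only [pvBlockA, List.length_append, List.length_cons]
      rw [if_pos (by push_cast; omega)]
    rw [hmid, List.reverse_nil, List.nil_append]
    rw [enum_shift suf (0 + pre.length + 1), List.flatMap_map]
    apply List.flatMap_congr
    intro jd hjd
    rcases (PySem.List.mem_enumerate_iff _ _ _).1 hjd with ⟨k, hk, rfl⟩
    simp only [pvBlockA, List.length_append, List.length_cons]
    rw [if_neg (by push_cast; omega), if_pos (by push_cast; omega)]
    simp only [List.reverse_cons, List.reverse_nil, List.nil_append, List.singleton_append,
      List.cons.injEq, and_true, true_and]
    exact congrArg (pvToken st) (by push_cast; omega)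

-- aux_split, packaged for the reversed-enumeration shape A's loop produces
lemma main_split (pre : List Char) (c : Char) (suf : List Char) (st : Option String) :
    ((PySem.List.enumerate (pre ++ c :: suf).reverse 0).flatMap
        (pvBlockA st (((pre ++ c :: suf).length : Int)) ((pre.length : Int)))).reverse
      = (PySem.List.enumerate pre 0).flatMap
          (fun jd => [String.ofList [jd.2], pvToken st ((pre.length : Int) - 1 - jd.1)])
        ++ (PySem.List.enumerate suf 0).flatMap
          (fun jd => [String.ofList [jd.2], pvToken st (-(jd.1 + 1))]) := by
  rw [List.reverse_flatMap, rev_enum, List.flatMap_map]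
  exact aux_split pre c suf st

-- ===== VERDICT (by name: the statement is the Claim_ definition above) =====
theorem convert_to_10ebased_spec : Claim_equal_convert_to_10ebased := by
  intro number st inv _ hpre
  obtain ⟨hdot, -⟩ := hpre
  unfold Spec_convert_to_10ebased
  -- the '.' found by index(): its position q
  have hinf : ['.'] <:+: number.toList := by
    rcases List.mem_iff_append.mp hdot with ⟨s, t, hst⟩
    exact ⟨s, t, by simpa using hst.symm⟩
  have hfind0 : 0 ≤ PySem.Chars.find number.toList ['.'] :=
    (PySem.Chars.find_nonneg_iff _ _).2 hinf
  have hfq : PySem.Chars.find number.toList ['.']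
      = ((PySem.Chars.find number.toList ['.']).toNat : Int) := (Int.toNat_of_nonneg hfind0).symm
  set q : Nat := (PySem.Chars.find number.toList ['.']).toNat with hqdef
  have hq : q < number.toList.length := by
    rcases (PySem.Chars.find_spec hfind0).1 with ⟨t, ht⟩
    by_contra h
    rw [List.drop_eq_nil_of_le (Nat.le_of_not_lt h)] at ht
    exact absurd ht (by simp)
  -- decompose number at the point
  obtain ⟨pre, c, suf, hcs, hpre', hsuf', hlen⟩ :
      ∃ pre c suf, number.toList = pre ++ c :: suf ∧ number.toList.take q = pre ∧
        number.toList.drop (q+1) = suf ∧ pre.length = q :=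
    ⟨number.toList.take q, number.toList[q], number.toList.drop (q+1),
      by conv_lhs => rw [← List.take_append_drop q number.toList, List.drop_eq_getElem_cons hq]
      , rfl, rfl, List.length_take_of_le hq.le⟩
  simp only [convert_to_10ebased, convert_to_10ebased_alt, PySem.Str.find_eq, PySem.Str.len_eq,
    show (".").toList = ['.'] from rfl]
  rw [foldlA_eq_flatMap, PySem.List.foldl_append_eq_flatMap, PySem.List.foldl_append_eq_flatMap,
    List.nil_append, List.nil_append]
  rw [hfq, Int.toNat_natCast, hpre', hsuf', ← hlen, hcs]
  cases inv
  · rw [if_pos (by decide), if_neg (by decide)]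
    exact congrArg (PySem.Str.join " ") (main_split pre c suf st)
  · rw [if_neg (by decide), if_pos (by decide)]
    refine congrArg (PySem.Str.join " ") ?_
    rw [← main_split pre c suf st, List.reverse_reverse]
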